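-- pv_equiv track=rewrite | github.com/sthagen/pm4py-pm4py-core | pm4py/algo/discovery/inductive/variants/im_clean/cuts/sequence_strict.py | skippable
-- ===== SOURCE A (Python) =====
-- import itertools
--
-- def skippable(p: int, dfg, start, end, groups) -> bool:
--     '''
--     This method implements the function SKIPPABLE as defined on page 233 of
--     "Robust Process Mining with Guarantees" by Sander J.J. Leemans (ISBN: 978-90-386-4257-4)
--     The function is used as a helper function for the strict sequence cut detection mechanism, which detects
--     larger groups of skippable activities.
--     '''
--     for i, j in itertools.product(range(0, p), range(p+1, len(groups))):
--         for a, b in itertools.product(groups[i], groups[j]):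
--             if (a, b) in dfg:
--                 return True
--     for i in range(p+1, len(groups)):
--         for a in groups[i]:
--             if a in start:
--                 return True
--     for i in range(0, p):
--         for a in groups[i]:
--             if a in end:
--                 return True
--     return False
-- ===== SOURCE B (Python) =====
-- def skippable(p: int, dfg, start, end, groups) -> bool:
--     before = set()
--     after = set()
--     for i, g in enumerate(groups):
--         if i < p:
--             before.update(g)
--         elif i > p:
--             after.update(g)
--     if any(a in before and b in after for a, b in dfg):
--         return True
--     if any(a in after for a in start):
--         return True
--     return any(a in before for a in end)
-- ===== Notes on version B (the rewrite author's own statement) =====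
-- stated objective: alternative
-- what changed: Instead of testing every (before-group, after-group) activity pair against dfg, B makes one pass over groups building 'before'/'after' activity sets and then one pass each over dfg, start and end testing set membership.
-- crash fix: A raises IndexError when p < -len(groups)-1, and when p > len(groups) unless some activity of some group is in end (then it returns True before reaching the bad index); B returns the natural set-based answer there. — e.g. on skippable(2, [("a", "a")], ["a"], [], [["a"]]): A raises IndexError, B returns false
import Mathlib
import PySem

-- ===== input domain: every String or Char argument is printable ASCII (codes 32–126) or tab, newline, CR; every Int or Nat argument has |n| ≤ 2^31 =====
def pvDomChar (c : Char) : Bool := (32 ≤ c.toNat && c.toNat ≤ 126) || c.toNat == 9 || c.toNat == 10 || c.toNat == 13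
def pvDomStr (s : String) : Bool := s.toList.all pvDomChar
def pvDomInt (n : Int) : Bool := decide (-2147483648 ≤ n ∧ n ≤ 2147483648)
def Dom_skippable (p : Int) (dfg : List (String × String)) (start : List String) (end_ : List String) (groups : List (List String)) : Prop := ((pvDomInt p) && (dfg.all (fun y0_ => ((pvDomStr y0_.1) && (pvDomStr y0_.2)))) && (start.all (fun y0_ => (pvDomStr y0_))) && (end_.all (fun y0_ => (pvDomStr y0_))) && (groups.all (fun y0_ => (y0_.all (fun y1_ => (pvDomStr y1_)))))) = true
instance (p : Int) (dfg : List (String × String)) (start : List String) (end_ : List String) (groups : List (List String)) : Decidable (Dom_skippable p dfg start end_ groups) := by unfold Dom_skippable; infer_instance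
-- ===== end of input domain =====

-- B replaces A's pairwise product scans by a single pass building before/after activity sets,
-- then single membership passes over dfg, start and end (objective: alternative).

-- ===== PORT A =====
def skippable (p : Int) (dfg : List (String × String)) (start : List String) (end_ : List String) (groups : List (List String)) : Bool :=
  if (PySem.List.pyRange 0 p 1).any (fun i =>
       (PySem.List.pyRange (p + 1) (groups.length : Int) 1).any (fun j =>
         (PySem.List.pyGetD groups i []).any (fun a =>
           (PySem.List.pyGetD groups j []).any (fun b => dfg.contains (a, b))))) then true
  else if (PySem.List.pyRange (p + 1) (groups.length : Int) 1).any (fun i =>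
       (PySem.List.pyGetD groups i []).any (fun a => start.contains a)) then true
  else if (PySem.List.pyRange 0 p 1).any (fun i =>
       (PySem.List.pyGetD groups i []).any (fun a => end_.contains a)) then true
  else false

-- ===== PORT B =====
def skipStep (p : Int) (st : PySem.Set String × PySem.Set String) (ig : Int × List String) :
    PySem.Set String × PySem.Set String :=
  if ig.1 < p then (PySem.Set.update st.1 ig.2, st.2)
  else if p < ig.1 then (st.1, PySem.Set.update st.2 ig.2)
  else st

def skipCheck (dfg : List (String × String)) (start end_ : List String)
    (st : PySem.Set String × PySem.Set String) : Bool :=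
  if dfg.any (fun ab => PySem.Set.contains st.1 ab.1 && PySem.Set.contains st.2 ab.2) then true
  else if start.any (fun a => PySem.Set.contains st.2 a) then true
  else end_.any (fun a => PySem.Set.contains st.1 a)

def skippable_alt (p : Int) (dfg : List (String × String)) (start : List String) (end_ : List String) (groups : List (List String)) : Bool :=
  skipCheck dfg start end_ ((PySem.List.enumerate groups 0).foldl (skipStep p) (PySem.Set.empty, PySem.Set.empty))

-- ===== PRECONDITION & SPEC =====
-- Pre_ admits exactly the inputs where the Python A returns: A raises IndexError when
-- p < -len(groups)-1, and when p > len(groups) unless some group activity lies in `end`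
-- (in that case A returns True before reaching the out-of-range index).
def Pre_skippable (p : Int) (dfg : List (String × String)) (start : List String) (end_ : List String) (groups : List (List String)) : Prop :=
  (-(groups.length : Int) - 1 ≤ p ∧ p ≤ (groups.length : Int)) ∨
  ((groups.length : Int) < p ∧ ∃ g ∈ groups, ∃ a ∈ g, a ∈ end_)
instance (p : Int) (dfg : List (String × String)) (start : List String) (end_ : List String) (groups : List (List String)) : Decidable (Pre_skippable p dfg start end_ groups) := by unfold Pre_skippable; infer_instance

def pvWitness_skippable : Int × (List (String × String)) × List String × List String × List (List String) :=
  (1, [("a", "c")], ["a"], ["c"], [["a"], ["b"], ["c"]])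

-- A raises IndexError exactly on the complement of Pre_: p < -len(groups)-1, or p > len(groups)
-- with no group activity in `end`; B returns its set-based answer there.
def Raises_skippable (p : Int) (dfg : List (String × String)) (start : List String) (end_ : List String) (groups : List (List String)) : Prop :=
  (p < -(groups.length : Int) - 1) ∨
  ((groups.length : Int) < p ∧ ¬ ∃ g ∈ groups, ∃ a ∈ g, a ∈ end_)
instance (p : Int) (dfg : List (String × String)) (start : List String) (end_ : List String) (groups : List (List String)) : Decidable (Raises_skippable p dfg start end_ groups) := by unfold Raises_skippable; infer_instance

def pvRaiseWitness_skippable : Int × (List (String × String)) × List String × List String × List (List String) :=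
  (2, [("a", "a")], ["a"], [], [["a"]])
def pvRaiseWitnessOut_skippable : Bool := false

def Spec_skippable (p : Int) (dfg : List (String × String)) (start : List String) (end_ : List String) (groups : List (List String)) (out : Bool) : Prop := out = skippable_alt p dfg start end_ groups
instance (p : Int) (dfg : List (String × String)) (start : List String) (end_ : List String) (groups : List (List String)) (out : Bool) : Decidable (Spec_skippable p dfg start end_ groups out) := by unfold Spec_skippable; infer_instance

-- ===== CLAIM (what is proved, stated in full; the proofs are below) =====
def Claim_equal_skippable : Prop := ∀ (p : Int) (dfg : List (String × String)) (start : List String) (end_ : List String) (groups : List (List String)), Dom_skippable p dfg start end_ groups → Pre_skippable p dfg start end_ groups → Spec_skippable p dfg start end_ groups (skippable p dfg start end_ groups)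

def Claim_raises_skippable : Prop := (∀ (p : Int) (dfg : List (String × String)) (start : List String) (end_ : List String) (groups : List (List String)), Dom_skippable p dfg start end_ groups → Raises_skippable p dfg start end_ groups → ¬ Pre_skippable p dfg start end_ groups) ∧ (Dom_skippable (pvRaiseWitness_skippable.1) (pvRaiseWitness_skippable.2.1) (pvRaiseWitness_skippable.2.2.1) (pvRaiseWitness_skippable.2.2.2.1) (pvRaiseWitness_skippable.2.2.2.2) ∧ Raises_skippable (pvRaiseWitness_skippable.1) (pvRaiseWitness_skippable.2.1) (pvRaiseWitness_skippable.2.2.1) (pvRaiseWitness_skippable.2.2.2.1) (pvRaiseWitness_skippable.2.2.2.2) ∧ skippable_alt (pvRaiseWitness_skippable.1) (pvRaiseWitness_skippable.2.1) (pvRaiseWitness_skippable.2.2.1) (pvRaiseWitness_skippable.2.2.2.1) (pvRaiseWitness_skippable.2.2.2.2) = pvRaiseWitnessOut_skippable)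

-- ===== LEMMAS AND PROOFS =====

-- activity a occurs in a group strictly before / strictly after position p
def InBefore (p : Int) (groups : List (List String)) (a : String) : Prop :=
  ∃ (k : Nat) (_ : k < groups.length), (k : Int) < p ∧ a ∈ groups[k]
def InAfter (p : Int) (groups : List (List String)) (a : String) : Prop :=
  ∃ (k : Nat) (_ : k < groups.length), p < (k : Int) ∧ a ∈ groups[k]

theorem fold_mem (p : Int) (gs : List (List String)) (s : Int)
    (init : PySem.Set String × PySem.Set String) (a : String) :
    (a ∈ ((PySem.List.enumerate gs s).foldl (skipStep p) init).1 ↔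
       a ∈ init.1 ∨ ∃ (k : Nat) (_ : k < gs.length), s + (k : Int) < p ∧ a ∈ gs[k]) ∧
    (a ∈ ((PySem.List.enumerate gs s).foldl (skipStep p) init).2 ↔
       a ∈ init.2 ∨ ∃ (k : Nat) (_ : k < gs.length), p < s + (k : Int) ∧ a ∈ gs[k]) := by
  induction gs generalizing s init with
  | nil => simp [PySem.List.enumerate_nil]
  | cons g gs ih =>
    rw [PySem.List.enumerate_cons]
    simp only [List.foldl_cons]
    constructor
    · rw [(ih (s+1) (skipStep p init (s, g))).1]
      unfold skipStep
      constructor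
      · rintro (h | ⟨k, hk, hkp, ha⟩)
        · split_ifs at h with h1 h2
          · rcases (PySem.Set.mem_update _ _ _).mp h with h | h
            · exact Or.inl h
            · exact Or.inr ⟨0, by simp, by simpa using h1, by simpa using h⟩
          · exact Or.inl h
          · exact Or.inl h
        · exact Or.inr ⟨k + 1, by simpa using hk, by push_cast; omega, by simpa using ha⟩
      · rintro (h | ⟨k, hk, hkp, ha⟩)
        · left; split_ifs with h1 h2
          · exact (PySem.Set.mem_update _ _ _).mpr (Or.inl h)
          · exact h
          · exact h
        · match k, hk with
          | 0, hk =>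
            left
            have h1 : s < p := by simpa using hkp
            simp only [if_pos h1]
            exact (PySem.Set.mem_update _ _ _).mpr (Or.inr (by simpa using ha))
          | k + 1, hk =>
            exact Or.inr ⟨k, by simpa using hk, by push_cast at hkp ⊢; omega, by simpa using ha⟩
    · rw [(ih (s+1) (skipStep p init (s, g))).2]
      unfold skipStep
      constructor
      · rintro (h | ⟨k, hk, hkp, ha⟩)
        · split_ifs at h with h1 h2
          · exact Or.inl h
          · rcases (PySem.Set.mem_update _ _ _).mp h with h | h
            · exact Or.inl h
            · exact Or.inr ⟨0, by simp, by simpa using h2, by simpa using h⟩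
          · exact Or.inl h
        · exact Or.inr ⟨k + 1, by simpa using hk, by push_cast; omega, by simpa using ha⟩
      · rintro (h | ⟨k, hk, hkp, ha⟩)
        · left; split_ifs with h1 h2
          · exact h
          · exact (PySem.Set.mem_update _ _ _).mpr (Or.inl h)
          · exact h
        · match k, hk with
          | 0, hk =>
            left
            have h2 : p < s := by simpa using hkp
            have h1 : ¬ s < p := by omega
            simp only [if_neg h1, if_pos h2]
            exact (PySem.Set.mem_update _ _ _).mpr (Or.inr (by simpa using ha))
          | k + 1, hk =>
            exact Or.inr ⟨k, by simpa using hk, by push_cast at hkp ⊢; omega, by simpa using ha⟩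

theorem alt_true_iff (p : Int) (dfg : List (String × String)) (start end_ : List String)
    (groups : List (List String)) :
    skippable_alt p dfg start end_ groups = true ↔
      (∃ ab ∈ dfg, InBefore p groups ab.1 ∧ InAfter p groups ab.2) ∨
      (∃ a ∈ start, InAfter p groups a) ∨ (∃ a ∈ end_, InBefore p groups a) := by
  unfold skippable_alt skipCheck
  have h1 := fun a => (fold_mem p groups 0 (PySem.Set.empty, PySem.Set.empty) a).1
  have h2 := fun a => (fold_mem p groups 0 (PySem.Set.empty, PySem.Set.empty) a).2
  simp only [PySem.Set.empty, List.not_mem_nil, false_or, zero_add] at h1 h2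
  split_ifs with c1 c2
  · simp only [true_iff]
    simp only [List.any_eq_true, Bool.and_eq_true, PySem.Set.contains_iff] at c1
    obtain ⟨ab, hab, hb, ha⟩ := c1
    exact Or.inl ⟨ab, hab, (h1 _).mp hb, (h2 _).mp ha⟩
  · simp only [true_iff]
    simp only [List.any_eq_true, PySem.Set.contains_iff] at c2
    obtain ⟨a, ha, hm⟩ := c2
    exact Or.inr (Or.inl ⟨a, ha, (h2 _).mp hm⟩)
  · simp only [List.any_eq_true, PySem.Set.contains_iff]
    constructor
    · rintro ⟨a, ha, hm⟩
      exact Or.inr (Or.inr ⟨a, ha, (h1 _).mp hm⟩)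
    · rintro (⟨ab, hab, hb, ha⟩ | ⟨a, ha, hm⟩ | ⟨a, ha, hm⟩)
      · refine absurd (List.any_eq_true.mpr ⟨ab, hab, ?_⟩) c1
        rw [Bool.and_eq_true, PySem.Set.contains_iff, PySem.Set.contains_iff]
        exact ⟨(h1 _).mpr hb, (h2 _).mpr ha⟩
      · refine absurd (List.any_eq_true.mpr ⟨a, ha, ?_⟩) c2
        rw [PySem.Set.contains_iff]
        exact (h2 _).mpr hm
      · exact ⟨a, ha, (h1 _).mpr hm⟩

theorem range_before (p : Int) (groups : List (List String)) (a : String)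
    (hhigh : p ≤ (groups.length : Int)) :
    (∃ i ∈ PySem.List.pyRange 0 p 1, a ∈ PySem.List.pyGetD groups i []) ↔ InBefore p groups a := by
  constructor
  · rintro ⟨i, hi, ha⟩
    rw [PySem.List.mem_pyRange_one] at hi
    have hlt : i < (groups.length : Int) := lt_of_lt_of_le hi.2 hhigh
    rw [PySem.List.pyGetD_eq_getElem groups [] hi.1 hlt] at ha
    exact ⟨i.toNat, by omega, by omega, ha⟩
  · rintro ⟨k, hk, hkp, ha⟩
    refine ⟨(k : Int), PySem.List.mem_pyRange_one.mpr ⟨by omega, hkp⟩, ?_⟩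
    rw [PySem.List.pyGetD_natCast]
    simpa [List.getD, hk] using ha

theorem range_after (p : Int) (groups : List (List String)) (a : String)
    (hlow : -(groups.length : Int) - 1 ≤ p) :
    (∃ j ∈ PySem.List.pyRange (p + 1) (groups.length : Int) 1, a ∈ PySem.List.pyGetD groups j []) ↔
      InAfter p groups a := by
  constructor
  · rintro ⟨j, hj, ha⟩
    rw [PySem.List.mem_pyRange_one] at hj
    by_cases h0 : 0 ≤ j
    · rw [PySem.List.pyGetD_eq_getElem groups [] h0 hj.2] at ha
      exact ⟨j.toNat, by omega, by omega, ha⟩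
    · have hm1 : 0 < (-j).toNat := by omega
      have hm2 : (-j).toNat ≤ groups.length := by omega
      have hj' : j = -(((-j).toNat : Nat) : Int) := by omega
      rw [hj', PySem.List.pyGetD_neg_natCast _ _ _ hm1 hm2] at ha
      exact ⟨groups.length - (-j).toNat, by omega, by omega, ha⟩
  · rintro ⟨k, hk, hkp, ha⟩
    refine ⟨(k : Int), PySem.List.mem_pyRange_one.mpr ⟨by omega, by omega⟩, ?_⟩
    rw [PySem.List.pyGetD_natCast]
    simpa [List.getD, hk] using ha

theorem a_true_iff (p : Int) (dfg : List (String × String)) (start end_ : List String)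
    (groups : List (List String)) (hlow : -(groups.length : Int) - 1 ≤ p)
    (hhigh : p ≤ (groups.length : Int)) :
    skippable p dfg start end_ groups = true ↔
      (∃ ab ∈ dfg, InBefore p groups ab.1 ∧ InAfter p groups ab.2) ∨
      (∃ a ∈ start, InAfter p groups a) ∨ (∃ a ∈ end_, InBefore p groups a) := by
  unfold skippable
  have hb := range_before p groups
  have hafter := range_after p groups
  split_ifs with c1 c2 c3
  · simp only [true_iff]
    simp only [List.any_eq_true, List.contains_eq_mem, decide_eq_true_eq] at c1
    obtain ⟨i, hi, j, hj, a, ha, b, hbm, hd⟩ := c1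
    exact Or.inl ⟨(a, b), hd, (hb a hhigh).mp ⟨i, hi, ha⟩, (hafter b hlow).mp ⟨j, hj, hbm⟩⟩
  · simp only [true_iff]
    simp only [List.any_eq_true, List.contains_eq_mem, decide_eq_true_eq] at c2
    obtain ⟨i, hi, a, ha, hs⟩ := c2
    exact Or.inr (Or.inl ⟨a, hs, (hafter a hlow).mp ⟨i, hi, ha⟩⟩)
  · simp only [true_iff]
    simp only [List.any_eq_true, List.contains_eq_mem, decide_eq_true_eq] at c3
    obtain ⟨i, hi, a, ha, hs⟩ := c3
    exact Or.inr (Or.inr ⟨a, hs, (hb a hhigh).mp ⟨i, hi, ha⟩⟩)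
  · simp only [false_iff]
    simp only [List.any_eq_true, List.contains_eq_mem, decide_eq_true_eq, not_exists] at c1 c2 c3
    rintro (⟨⟨a, b⟩, hd, hfa, haf⟩ | ⟨a, ha, hm⟩ | ⟨a, ha, hm⟩)
    · obtain ⟨i, hi, hia⟩ := (hb a hhigh).mpr hfa
      obtain ⟨j, hj, hjb⟩ := (hafter b hlow).mpr haf
      push Not at c1
      exact absurd hd (c1 i hi j hj a hia b hjb)
    · obtain ⟨i, hi, hia⟩ := (hafter a hlow).mpr hm
      push Not at c2
      exact absurd ha (c2 i hi a hia)
    · obtain ⟨i, hi, hia⟩ := (hb a hhigh).mpr hm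
      push Not at c3
      exact absurd ha (c3 i hi a hia)

-- ===== VERDICT (by name: the statement is the Claim_ definition above) =====
theorem skippable_spec : Claim_equal_skippable := by
  intro p dfg start end_ groups _ hpre
  unfold Spec_skippable
  rcases hpre with ⟨hlow, hhigh⟩ | ⟨hbig, g, hg, a, hag, hae⟩
  · rw [Bool.eq_iff_iff, a_true_iff p dfg start end_ groups hlow hhigh,
      alt_true_iff p dfg start end_ groups]
  · -- p > len(groups): both sides are true via the end-activity hit
    obtain ⟨k, hk, hgk⟩ := List.getElem_of_mem hg
    have hbef : InBefore p groups a := ⟨k, hk, by omega, by rw [hgk]; exact hag⟩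
    have hB : skippable_alt p dfg start end_ groups = true := by
      rw [alt_true_iff]
      exact Or.inr (Or.inr ⟨a, hae, hbef⟩)
    have hA : skippable p dfg start end_ groups = true := by
      unfold skippable
      split_ifs with c1 c2 c3
      · rfl
      · rfl
      · rfl
      · exfalso
        apply c3
        simp only [List.any_eq_true, List.contains_eq_mem, decide_eq_true_eq]
        refine ⟨(k : Int), PySem.List.mem_pyRange_one.mpr ⟨by omega, by omega⟩, a, ?_, hae⟩
        rw [PySem.List.pyGetD_natCast]
        simp only [List.getD, hgk ▸ (List.getElem?_eq_getElem hk)]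
        exact hgk ▸ hag
    rw [hA, hB]

@[simp] theorem skippable_raises : Claim_raises_skippable := by
  unfold Claim_raises_skippable
  refine ⟨?_, by decide⟩
  intro p dfg start end_ groups _ hr hpre
  unfold Raises_skippable at hr
  unfold Pre_skippable at hpre
  rcases hpre with ⟨h1, h2⟩ | ⟨h1, h2⟩ <;> rcases hr with h3 | ⟨h3, h4⟩ <;> first | omega | exact h4 h2
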